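-- pv_equiv track=rewrite | github.com/photboll/leetcode | 1298.maximum-candies-you-can-get-from-boxes.py | maxCandies
-- ===== SOURCE A (Python) =====
-- from typing import List
--
-- from collections import deque
--
-- def maxCandies(status: List[int], candies: List[int], keys: List[List[int]], containedBoxes: List[List[int]], initialBoxes: List[int]) -> int:
--     """
--     BFS on the current available boxes
--     we need another structure that keeps track of boxes that are currently available to use but  are not open
--     Boxes that are available and have status 1, should be added to the queue.
--     When we find a key, we change the status of this box to 1 and check if is in our available boxes list
--     in which case we move it to the queue.
--     When we find new boxes: we check if they are open, in which case we move it to the queue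
--     else we move it to the available boxes set
--     """
--
--
--     tot_candies = 0
--     locked_boxes = set()
--     q = deque()
--     for box in initialBoxes:
--         if status[box] == 1:
--             q.appendleft(box)
--         else:
--             locked_boxes.add(box)
--
--
--     while q:
--         cur_box = q.pop()
--         tot_candies += candies[cur_box]
--
--         #Check if the new keys can open any boxes
--         for key in keys[cur_box]:
--             status[key] = 1
--             if key in locked_boxes:
--                 locked_boxes.remove(key)
--                 q.appendleft(key)
--
--         #check if the containedBoxes can be opened
--         for new_box in containedBoxes[cur_box]:
--             if status[new_box] == 1:
--                 q.appendleft(new_box)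
--             else:
--                 locked_boxes.add(new_box)
--
--     return tot_candies
-- ===== SOURCE B (Python) =====
-- from typing import List
--
--
-- def maxCandies(status: List[int], candies: List[int], keys: List[List[int]], containedBoxes: List[List[int]], initialBoxes: List[int]) -> int:
--     # Iterate-to-fixpoint sweep: keep an ordered collection of owned boxes, a set of
--     # found keys and a set of opened boxes; repeat full passes over the owned boxes,
--     # opening every openable unopened one, until a pass opens nothing.
--     # (Unlike A, this does not mutate the status list.)
--     owned = []
--     for b in initialBoxes:
--         if b not in owned:
--             owned.append(b)
--     found_keys = set()
--     opened = set()
--     tot = 0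
--     progress = True
--     while progress:
--         progress = False
--         for b in list(owned):  # snapshot: boxes found during the pass wait for the next pass
--             if b not in opened and (status[b] == 1 or b in found_keys):
--                 opened.add(b)
--                 tot += candies[b]
--                 found_keys.update(keys[b])
--                 for nb in containedBoxes[b]:
--                     if nb not in owned:
--                         owned.append(nb)
--                 progress = True
--     return tot
-- ===== Notes on version B (the rewrite author's own statement) =====
-- stated objective: alternative
-- what changed: Replaces the deque-based BFS with mutation of the status list by an iterate-to-fixpoint sweep: repeated full passes over an ordered collection of owned boxes, opening every openable unopened box (tracking found keys and opened boxes in sets) until a pass opens nothing; B does not mutate status.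
-- outside the precondition, e.g. on maxCandies([1, 0], [1, 2], [[-1], []], [[1], []], [0]): A returns 3, B returns 1; on maxCandies([1, 1], [3, 5], [[], []], [[1], []], [0, 1]): A returns 13, B returns 8
import Mathlib
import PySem

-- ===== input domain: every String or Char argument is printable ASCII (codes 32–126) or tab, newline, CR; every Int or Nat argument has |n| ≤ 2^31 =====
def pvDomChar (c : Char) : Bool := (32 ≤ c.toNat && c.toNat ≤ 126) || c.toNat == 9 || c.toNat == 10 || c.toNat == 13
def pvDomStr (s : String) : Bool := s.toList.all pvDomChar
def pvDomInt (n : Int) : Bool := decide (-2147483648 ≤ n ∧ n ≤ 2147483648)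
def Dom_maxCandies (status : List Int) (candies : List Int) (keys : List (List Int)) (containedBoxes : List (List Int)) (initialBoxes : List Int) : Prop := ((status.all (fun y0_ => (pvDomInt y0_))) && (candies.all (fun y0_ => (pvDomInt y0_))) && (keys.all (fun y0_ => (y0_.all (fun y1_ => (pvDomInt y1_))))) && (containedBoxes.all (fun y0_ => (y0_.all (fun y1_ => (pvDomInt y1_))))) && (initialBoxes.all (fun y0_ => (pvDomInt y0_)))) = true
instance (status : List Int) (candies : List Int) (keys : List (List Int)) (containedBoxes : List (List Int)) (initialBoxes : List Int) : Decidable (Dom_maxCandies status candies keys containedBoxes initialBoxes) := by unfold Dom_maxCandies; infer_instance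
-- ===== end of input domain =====

-- B replaces A's deque BFS by an iterate-to-fixpoint sweep over owned boxes with found-key and
-- opened sets. A mutates its `status` argument in place (status[key]=1) while B does not: the
-- equivalence proved here is about the RETURN value only.

-- ===== PORT A =====
-- the 'for box in …: if status[box] == 1: q.appendleft(box) else: locked_boxes.add(box)' loop
-- (appears verbatim twice in A: over initialBoxes and over containedBoxes[cur_box]);
-- the deque is a List Int whose head is the LEFT end: appendleft = cons, pop = getLast
def pvAInit (stat : List Int) (st : List Int × PySem.Set Int) (box : Int) : List Int × PySem.Set Int :=
  if PySem.List.pyGetD stat box 0 == 1 then (box :: st.1, st.2) else (st.1, PySem.Set.add st.2 box)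

-- one step of 'for key in keys[cur_box]: status[key] = 1; if key in locked_boxes: …'
-- (pySetD is exact under Pre_, which keeps every key index in range)
def pvAKey (st : List Int × List Int × PySem.Set Int) (key : Int) : List Int × List Int × PySem.Set Int :=
  let stat' := PySem.List.pySetD st.1 key 1
  if PySem.Set.contains st.2.2 key then (stat', key :: st.2.1, PySem.Set.discard st.2.2 key)
  else (stat', st.2.1, st.2.2)

-- the 'while q:' loop; fuel only makes it total (under Pre_ it never runs out)
def pvALoop (candies : List Int) (keys : List (List Int)) (containedBoxes : List (List Int)) :
    Nat → List Int → List Int → PySem.Set Int → Int → Int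
  | 0, _, _, _, tot => tot
  | fuel + 1, stat, q, locked, tot =>
    match q.getLast? with
    | none => tot
    | some cur =>
      let q1 := q.dropLast
      let tot1 := tot + PySem.List.pyGetD candies cur 0
      let s2 := (PySem.List.pyGetD keys cur []).foldl pvAKey (stat, q1, locked)
      let s3 := (PySem.List.pyGetD containedBoxes cur []).foldl (pvAInit s2.1) (s2.2.1, s2.2.2)
      pvALoop candies keys containedBoxes fuel s2.1 s3.1 s3.2 tot1

def maxCandies (status : List Int) (candies : List Int) (keys : List (List Int)) (containedBoxes : List (List Int)) (initialBoxes : List Int) : Int :=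
  let s0 := initialBoxes.foldl (pvAInit status) ([], PySem.Set.empty)
  pvALoop candies keys containedBoxes (initialBoxes.length + containedBoxes.flatten.length + 1) status s0.1 s0.2 0

-- ===== PORT B =====
-- one box of a sweep pass: state = (owned, found_keys, opened, tot, progress)
def pvBStep (status : List Int) (candies : List Int) (keys : List (List Int)) (containedBoxes : List (List Int))
    (st : PySem.Set Int × PySem.Set Int × PySem.Set Int × Int × Bool) (b : Int) :
    PySem.Set Int × PySem.Set Int × PySem.Set Int × Int × Bool :=
  if !(PySem.Set.contains st.2.2.1 b) && (PySem.List.pyGetD status b 0 == 1 || PySem.Set.contains st.2.1 b) then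
    ((PySem.List.pyGetD containedBoxes b []).foldl PySem.Set.add st.1,
     PySem.Set.update st.2.1 (PySem.List.pyGetD keys b []),
     PySem.Set.add st.2.2.1 b,
     st.2.2.2.1 + PySem.List.pyGetD candies b 0,
     true)
  else st

-- the 'while progress:' loop; each pass folds over the snapshot of owned;
-- fuel only makes it total (under Pre_ it never runs out)
def pvBLoop (status : List Int) (candies : List Int) (keys : List (List Int)) (containedBoxes : List (List Int)) :
    Nat → PySem.Set Int → PySem.Set Int → PySem.Set Int → Int → Int
  | 0, _, _, _, tot => tot
  | fuel + 1, owned, keysF, opened, tot =>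
    let s := owned.foldl (pvBStep status candies keys containedBoxes) (owned, keysF, opened, tot, false)
    if s.2.2.2.2 then pvBLoop status candies keys containedBoxes fuel s.1 s.2.1 s.2.2.1 s.2.2.2.1
    else s.2.2.2.1

def maxCandies_alt (status : List Int) (candies : List Int) (keys : List (List Int)) (containedBoxes : List (List Int)) (initialBoxes : List Int) : Int :=
  pvBLoop status candies keys containedBoxes (status.length + 1)
    (PySem.Set.ofList initialBoxes) PySem.Set.empty PySem.Set.empty 0

-- ===== PRECONDITION & SPEC =====
-- no initial box is openable: A's queue stays empty and it returns 0 reading only status[box]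
def pvPreNoOpen (status : List Int) (initialBoxes : List Int) : Prop :=
  ∀ b ∈ initialBoxes, PySem.Raise.InRange status.length b ∧ PySem.List.pyGetD status b 0 ≠ 1

-- the problem's contract (LeetCode 1298): equal-length per-box lists, indices in range,
-- and no box discoverable twice
def pvPreStruct (status : List Int) (candies : List Int) (keys : List (List Int)) (containedBoxes : List (List Int)) (initialBoxes : List Int) : Prop :=
  candies.length = status.length ∧ keys.length = status.length ∧ containedBoxes.length = status.length ∧
  (∀ b ∈ initialBoxes, 0 ≤ b ∧ b < (status.length : Int)) ∧
  (∀ l ∈ keys, ∀ k ∈ l, 0 ≤ k ∧ k < (status.length : Int)) ∧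
  (∀ l ∈ containedBoxes, ∀ b ∈ l, 0 ≤ b ∧ b < (status.length : Int)) ∧
  (initialBoxes ++ containedBoxes.flatten).Nodup

-- Pre_ admits the inputs where no initial box can be opened (A returns 0 there, whatever the
-- other lists hold) together with the problem's own contract (pvPreStruct).  Outside it A
-- raises IndexError, or loops forever on containment cycles, or returns accidental values
-- (negative-index wraparound when writing status[key]=1, double-counted candies for a box
-- discovered twice via the non-deduplicating queue) — see the cited examples in the claim.
def Pre_maxCandies (status : List Int) (candies : List Int) (keys : List (List Int)) (containedBoxes : List (List Int)) (initialBoxes : List Int) : Prop :=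
  pvPreNoOpen status initialBoxes ∨
  pvPreStruct status candies keys containedBoxes initialBoxes

instance (status : List Int) (candies : List Int) (keys : List (List Int)) (containedBoxes : List (List Int)) (initialBoxes : List Int) : Decidable (Pre_maxCandies status candies keys containedBoxes initialBoxes) := by
  unfold Pre_maxCandies pvPreNoOpen pvPreStruct; infer_instance

def pvWitness_maxCandies : List Int × List Int × List (List Int) × List (List Int) × List Int :=
  ([1, 0], [2, 3], [[1], []], [[1], []], [0])

def Spec_maxCandies (status : List Int) (candies : List Int) (keys : List (List Int)) (containedBoxes : List (List Int)) (initialBoxes : List Int) (out : Int) : Prop := out = maxCandies_alt status candies keys containedBoxes initialBoxes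
instance (status : List Int) (candies : List Int) (keys : List (List Int)) (containedBoxes : List (List Int)) (initialBoxes : List Int) (out : Int) : Decidable (Spec_maxCandies status candies keys containedBoxes initialBoxes out) := by unfold Spec_maxCandies; infer_instance

-- ===== CLAIM (what is proved, stated in full; the proofs are below) =====
def Claim_equal_maxCandies : Prop := ∀ (status : List Int) (candies : List Int) (keys : List (List Int)) (containedBoxes : List (List Int)) (initialBoxes : List Int), Dom_maxCandies status candies keys containedBoxes initialBoxes → Pre_maxCandies status candies keys containedBoxes initialBoxes → Spec_maxCandies status candies keys containedBoxes initialBoxes (maxCandies status candies keys containedBoxes initialBoxes)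

-- ===== LEMMAS AND PROOFS =====

-- the boxes both algorithms open: discoverable (initial or contained in a reachable box)
-- and openable (status 1 or a key held by a reachable box)
inductive pvReach (status : List Int) (keys : List (List Int)) (containedBoxes : List (List Int)) (initialBoxes : List Int) : Int → Prop
  | init_status (b : Int) (hd : b ∈ initialBoxes) (ho : PySem.List.pyGetD status b 0 = 1) :
      pvReach status keys containedBoxes initialBoxes b
  | init_key (b c : Int) (hd : b ∈ initialBoxes) (hc : pvReach status keys containedBoxes initialBoxes c)
      (hk : b ∈ PySem.List.pyGetD keys c []) : pvReach status keys containedBoxes initialBoxes b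
  | cont_status (b c : Int) (hc : pvReach status keys containedBoxes initialBoxes c)
      (hd : b ∈ PySem.List.pyGetD containedBoxes c []) (ho : PySem.List.pyGetD status b 0 = 1) :
      pvReach status keys containedBoxes initialBoxes b
  | cont_key (b c c' : Int) (hc : pvReach status keys containedBoxes initialBoxes c)
      (hd : b ∈ PySem.List.pyGetD containedBoxes c []) (hc' : pvReach status keys containedBoxes initialBoxes c')
      (hk : b ∈ PySem.List.pyGetD keys c' []) : pvReach status keys containedBoxes initialBoxes b

lemma pvReach_intro (status : List Int) (keys : List (List Int)) (containedBoxes : List (List Int)) (initialBoxes : List Int) (b : Int)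
    (hd : b ∈ initialBoxes ∨ ∃ c, pvReach status keys containedBoxes initialBoxes c ∧ b ∈ PySem.List.pyGetD containedBoxes c [])
    (ho : PySem.List.pyGetD status b 0 = 1 ∨ ∃ c, pvReach status keys containedBoxes initialBoxes c ∧ b ∈ PySem.List.pyGetD keys c []) :
    pvReach status keys containedBoxes initialBoxes b := by
  rcases hd with hd | ⟨c, hc, hd⟩ <;> rcases ho with ho | ⟨c', hc', hk⟩
  · exact .init_status b hd ho
  · exact .init_key b c' hd hc' hk
  · exact .cont_status b c hc hd ho
  · exact .cont_key b c c' hc hd hc' hk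

def pvValid (n : Nat) (b : Int) : Prop := 0 ≤ b ∧ b < (n : Int)

def pvCand (candies : List Int) (P : List Int) : Int :=
  (P.map (fun b => PySem.List.pyGetD candies b 0)).sum

-- stat agrees with status except at the already-applied keys K, which are 1
def pvStatOK (status : List Int) (K : List Int) (stat : List Int) : Prop :=
  stat.length = status.length ∧
  ∀ b : Int, 0 ≤ b → b < (status.length : Int) →
    ((b ∈ K → PySem.List.pyGetD stat b 0 = 1) ∧
     (b ∉ K → PySem.List.pyGetD stat b 0 = PySem.List.pyGetD status b 0))

def pvKeysOf (keys : List (List Int)) (P : List Int) : List Int :=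
  P.flatMap (fun c => PySem.List.pyGetD keys c [])

def pvOpen (status : List Int) (keys : List (List Int)) (P : List Int) (b : Int) : Prop :=
  PySem.List.pyGetD status b 0 = 1 ∨ b ∈ pvKeysOf keys P

def pvDisc (containedBoxes : List (List Int)) (initialBoxes : List Int) (P : List Int) (b : Int) : Prop :=
  b ∈ initialBoxes ∨ b ∈ P.flatMap (fun c => PySem.List.pyGetD containedBoxes c [])

-- invariant of A's while-loop; P = boxes popped (= opened) so far
def pvInvA (status : List Int) (candies : List Int) (keys : List (List Int)) (containedBoxes : List (List Int)) (initialBoxes : List Int)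
    (P q locked stat : List Int) (tot : Int) : Prop :=
  pvStatOK status (pvKeysOf keys P) stat ∧
  (P ++ q ++ locked).Nodup ∧
  (∀ b ∈ P, pvValid status.length b ∧ pvReach status keys containedBoxes initialBoxes b) ∧
  (∀ b ∈ P ++ q ++ locked, pvDisc containedBoxes initialBoxes P b) ∧
  (∀ b ∈ q, pvValid status.length b ∧ pvReach status keys containedBoxes initialBoxes b ∧ pvOpen status keys P b) ∧
  (∀ b ∈ locked, pvValid status.length b ∧ ¬ pvOpen status keys P b) ∧
  (∀ b : Int, pvDisc containedBoxes initialBoxes P b → b ∈ P ∨ b ∈ q ∨ b ∈ locked) ∧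
  tot = pvCand candies P

-- invariant of B's sweep loop
def pvInvB (status : List Int) (candies : List Int) (keys : List (List Int)) (containedBoxes : List (List Int)) (initialBoxes : List Int)
    (owned keysF opened : List Int) (tot : Int) : Prop :=
  opened.Nodup ∧
  (∀ b ∈ opened, pvValid status.length b ∧ pvReach status keys containedBoxes initialBoxes b) ∧
  (∀ b : Int, b ∈ keysF ↔ ∃ c ∈ opened, b ∈ PySem.List.pyGetD keys c []) ∧
  (∀ b : Int, b ∈ owned ↔ b ∈ initialBoxes ∨ ∃ c ∈ opened, b ∈ PySem.List.pyGetD containedBoxes c []) ∧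
  tot = pvCand candies opened

-- a nodup list of distinct members of L is no longer than L
lemma pv_nodup_length_le {α : Type} [DecidableEq α] (P L : List α) (h : P.Nodup) (hs : ∀ b ∈ P, b ∈ L) :
    P.length ≤ L.length := by
  classical
  have : P.Subperm L := List.subperm_of_subset h hs
  exact this.length_le

lemma pv_getD_block (L : List (List Int)) (c : Int) (h0 : 0 ≤ c) (h1 : c < (L.length : Int)) :
    PySem.List.pyGetD L c [] = L[c.toNat]'(by omega) ∧ PySem.List.pyGetD L c [] ∈ L := by
  have h := PySem.List.pyGetD_eq_getElem (xs := L) (i := c) (d := []) h0 h1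
  exact ⟨h, by rw [h]; exact List.getElem_mem _⟩

lemma pv_statOK_set (status K stat : List Int) (k : Int)
    (hk0 : 0 ≤ k) (_hk1 : k < (status.length : Int))
    (h : pvStatOK status K stat) : pvStatOK status (K ++ [k]) (PySem.List.pySetD stat k 1) := by
  obtain ⟨hl, hpt⟩ := h
  have hset : PySem.List.pySetD stat k 1 = stat.set k.toNat 1 := PySem.List.pySetD_of_nonneg stat 1 hk0
  have hlen : (PySem.List.pySetD stat k 1).length = status.length := by
    rw [hset, List.length_set, hl]
  refine ⟨hlen, ?_⟩
  intro b hb0 hbn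
  have hk' : ((k.toNat : Int)) = k := Int.toNat_of_nonneg hk0
  have hget : PySem.List.pyGetD (PySem.List.pySetD stat k 1) b 0
      = if k.toNat = b.toNat then 1 else PySem.List.pyGetD stat b 0 := by
    rw [hset]
    rw [PySem.List.pyGetD_eq_getElem (xs := stat.set k.toNat 1) (i := b) (d := 0) hb0
      (by rw [List.length_set]; omega)]
    rw [List.getElem_set]
    split_ifs with hkb
    · rfl
    · rw [PySem.List.pyGetD_eq_getElem (xs := stat) (i := b) (d := 0) hb0 (by omega)]
  constructor
  · intro hbK
    rcases List.mem_append.mp hbK with hbK | hbk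
    · rw [hget]
      split_ifs with hkb
      · rfl
      · exact (hpt b hb0 hbn).1 hbK
    · have hbk' : b = k := by simpa using hbk
      rw [hget, if_pos (by omega)]
  · intro hbK
    have hbK' : b ∉ K := fun hx => hbK (List.mem_append.mpr (Or.inl hx))
    have hbk : b ≠ k := fun hx => hbK (List.mem_append.mpr (Or.inr (by simp [hx])))
    rw [hget, if_neg (by omega)]
    exact (hpt b hb0 hbn).2 hbK'

lemma pv_fresh (containedBoxes : List (List Int)) (initialBoxes : List Int)
    (hnd : (initialBoxes ++ containedBoxes.flatten).Nodup)
    (P : List Int) (cur b : Int)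
    (hc0 : 0 ≤ cur) (hc1 : cur < (containedBoxes.length : Int)) (hcurP : cur ∉ P)
    (hPv : ∀ c ∈ P, 0 ≤ c ∧ c < (containedBoxes.length : Int))
    (hb : b ∈ PySem.List.pyGetD containedBoxes cur [])
    (hdisc : pvDisc containedBoxes initialBoxes P b) : False := by
  obtain ⟨hgc, hmemc⟩ := pv_getD_block containedBoxes cur hc0 hc1
  have hflat := List.nodup_append.mp hnd
  have hbflat : b ∈ containedBoxes.flatten :=
    List.mem_flatten.mpr ⟨_, hmemc, hb⟩
  have hpw : containedBoxes.Pairwise List.Disjoint := (List.nodup_flatten.mp hflat.2.1).2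
  rcases hdisc with hbi | hbf
  · exact hflat.2.2 b hbi b hbflat rfl
  · obtain ⟨c, hcP, hbc⟩ := List.mem_flatMap.mp hbf
    obtain ⟨hcv0, hcv1⟩ := hPv c hcP
    obtain ⟨hgc', _⟩ := pv_getD_block containedBoxes c hcv0 hcv1
    have hcne : c ≠ cur := fun h => hcurP (h ▸ hcP)
    have hne : c.toNat ≠ cur.toNat := by omega
    have hpw' := List.pairwise_iff_getElem.mp hpw
    rcases Nat.lt_or_ge c.toNat cur.toNat with hlt | hge
    · exact hpw' c.toNat cur.toNat (by omega) (by omega) hlt (hgc' ▸ hbc) (hgc ▸ hb)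
    · have hlt : cur.toNat < c.toNat := by omega
      exact hpw' cur.toNat c.toNat (by omega) (by omega) hlt (hgc ▸ hb) (hgc' ▸ hbc)

-- the 'for key in keys[cur_box]' loop of A
lemma pvAKey_fold (status : List Int) (ks : List Int) :
    ∀ (applied stat q locked : List Int),
      (∀ k ∈ ks, 0 ≤ k ∧ k < (status.length : Int)) →
      pvStatOK status applied stat →
      locked.Nodup →
      pvStatOK status (applied ++ ks) (ks.foldl pvAKey (stat, q, locked)).1 ∧
      ((ks.foldl pvAKey (stat, q, locked)).2.1 ++ (ks.foldl pvAKey (stat, q, locked)).2.2).Perm (q ++ locked) ∧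
      (∀ b, b ∈ (ks.foldl pvAKey (stat, q, locked)).2.1 ↔ b ∈ q ∨ (b ∈ locked ∧ b ∈ ks)) ∧
      (∀ b, b ∈ (ks.foldl pvAKey (stat, q, locked)).2.2 ↔ b ∈ locked ∧ b ∉ ks) ∧
      (ks.foldl pvAKey (stat, q, locked)).2.2.Nodup := by
  induction ks with
  | nil =>
    intro applied stat q locked _ hstat hnl
    simp only [List.foldl_nil, List.append_nil]
    exact ⟨hstat, List.Perm.refl _, by simp, by simp, hnl⟩
  | cons k ks ih =>
    intro applied stat q locked hv hstat hnl
    have hk := hv k (by simp)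
    have hstat2 := pv_statOK_set status applied stat k hk.1 hk.2 hstat
    simp only [List.foldl_cons]
    by_cases hmem : k ∈ locked
    · have hstep : pvAKey (stat, q, locked) k
          = (PySem.List.pySetD stat k 1, k :: q, PySem.Set.discard locked k) := by
        simp [pvAKey, hmem]
      rw [hstep]
      obtain ⟨h1, h2, h3, h4, h5⟩ := ih (applied ++ [k]) (PySem.List.pySetD stat k 1) (k :: q)
        (PySem.Set.discard locked k) (fun x hx => hv x (by simp [hx]))
        hstat2 (PySem.Set.nodup_discard locked k hnl)
      refine ⟨by simpa [List.append_assoc] using h1, ?_, ?_, ?_, h5⟩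
      · refine h2.trans ?_
        have hd : (k :: PySem.Set.discard locked k).Perm locked := by
          refine (List.perm_ext_iff_of_nodup ?_ hnl).mpr ?_
          · exact List.nodup_cons.mpr ⟨by simp [PySem.Set.mem_discard], PySem.Set.nodup_discard locked k hnl⟩
          · intro x
            simp only [List.mem_cons, PySem.Set.mem_discard]
            constructor
            · rintro (rfl | ⟨hx, _⟩) <;> assumption
            · intro hx
              by_cases hxk : x = k
              · exact Or.inl hxk
              · exact Or.inr ⟨hx, hxk⟩
        have e1 : (k :: q) ++ PySem.Set.discard locked k
            = k :: (q ++ PySem.Set.discard locked k) := rfl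
        rw [e1]
        exact List.Perm.trans List.perm_middle.symm (List.Perm.append_left q hd)
      · intro b
        rw [h3 b]
        simp only [List.mem_cons, PySem.Set.mem_discard]
        by_cases hbk : b = k
        · subst hbk; simp [hmem]
        · simp only [hbk, false_or, ne_eq]
          tauto
      · intro b
        rw [h4 b]
        simp only [PySem.Set.mem_discard, List.mem_cons]
        by_cases hbk : b = k
        · subst hbk; simp
        · simp [hbk]
    · have hstep : pvAKey (stat, q, locked) k = (PySem.List.pySetD stat k 1, q, locked) := by
        simp [pvAKey, hmem]
      rw [hstep]
      obtain ⟨h1, h2, h3, h4, h5⟩ := ih (applied ++ [k]) (PySem.List.pySetD stat k 1) q locked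
        (fun x hx => hv x (by simp [hx])) hstat2 hnl
      refine ⟨by simpa [List.append_assoc] using h1, h2, ?_, ?_, h5⟩
      · intro b
        rw [h3 b]
        simp only [List.mem_cons]
        constructor
        · rintro (hb | ⟨hb1, hb2⟩)
          · exact Or.inl hb
          · exact Or.inr ⟨hb1, Or.inr hb2⟩
        · rintro (hb | ⟨hb1, rfl | hb2⟩)
          · exact Or.inl hb
          · exact absurd hb1 hmem
          · exact Or.inr ⟨hb1, hb2⟩
      · intro b
        rw [h4 b]
        simp only [List.mem_cons]
        constructor
        · rintro ⟨hb1, hb2⟩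
          refine ⟨hb1, ?_⟩
          rintro (rfl | hb)
          · exact hmem hb1
          · exact hb2 hb
        · rintro ⟨hb1, hb2⟩
          exact ⟨hb1, fun hb => hb2 (Or.inr hb)⟩

-- the 'if status[box] == 1: appendleft else locked.add' loop of A (initial and contained boxes)
lemma pvAInit_fold (stat2 : List Int) (cs : List Int) :
    ∀ (q locked : List Int), cs.Nodup → (∀ b ∈ cs, b ∉ locked) →
      (cs.foldl (pvAInit stat2) (q, locked)).1
        = (cs.filter (fun b => PySem.List.pyGetD stat2 b 0 == 1)).reverse ++ q ∧
      (cs.foldl (pvAInit stat2) (q, locked)).2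
        = locked ++ cs.filter (fun b => !(PySem.List.pyGetD stat2 b 0 == 1)) := by
  induction cs with
  | nil => intro q locked _ _; simp
  | cons c cs ih =>
    intro q locked hnd hfresh
    have hcq : c ∉ locked := hfresh c (by simp)
    have hndc := List.nodup_cons.mp hnd
    simp only [List.foldl_cons]
    by_cases hop : PySem.List.pyGetD stat2 c 0 == 1
    · have hstep : pvAInit stat2 (q, locked) c = (c :: q, locked) := by simp [pvAInit, hop]
      rw [hstep]
      obtain ⟨h1, h2⟩ := ih (c :: q) locked hndc.2 (fun b hb => hfresh b (by simp [hb]))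
      refine ⟨?_, ?_⟩
      · rw [h1, List.filter_cons, if_pos (by simpa using hop)]
        simp
      · rw [h2, List.filter_cons]
        simp [hop]
    · have hstep : pvAInit stat2 (q, locked) c = (q, PySem.Set.add locked c) := by
        simp [pvAInit, hop]
      rw [hstep]
      have hadd : PySem.Set.add locked c = locked ++ [c] := PySem.Set.add_of_not_mem hcq
      rw [hadd]
      have hfresh2 : ∀ b ∈ cs, b ∉ locked ++ [c] := by
        intro b hb
        simp only [List.mem_append, List.mem_singleton]
        rintro (hbl | rfl)
        · exact hfresh b (by simp [hb]) hbl
        · exact hndc.1 hb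
      obtain ⟨h1, h2⟩ := ih q (locked ++ [c]) hndc.2 hfresh2
      refine ⟨?_, ?_⟩
      · rw [h1, List.filter_cons]
        simp [hop]
      · rw [h2, List.filter_cons, if_pos (by simpa using hop)]
        simp

lemma pv_keysOf_snoc (keys : List (List Int)) (P : List Int) (cur : Int) :
    pvKeysOf keys (P ++ [cur]) = pvKeysOf keys P ++ PySem.List.pyGetD keys cur [] := by
  simp [pvKeysOf]

lemma pv_reach_of_disc_open (status : List Int) (keys containedBoxes : List (List Int)) (initialBoxes : List Int)
    (P : List Int) (b : Int)
    (hPr : ∀ c ∈ P, pvReach status keys containedBoxes initialBoxes c)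
    (hd : pvDisc containedBoxes initialBoxes P b)
    (ho : pvOpen status keys P b) : pvReach status keys containedBoxes initialBoxes b := by
  apply pvReach_intro
  · rcases hd with h | h
    · exact Or.inl h
    · obtain ⟨c, hc, hbc⟩ := List.mem_flatMap.mp h
      exact Or.inr ⟨c, hPr c hc, hbc⟩
  · rcases ho with h | h
    · exact Or.inl h
    · obtain ⟨c, hc, hbc⟩ := List.mem_flatMap.mp (by simpa [pvKeysOf] using h)
      exact Or.inr ⟨c, hPr c hc, hbc⟩

lemma pvALoop_spec (status candies : List Int) (keys containedBoxes : List (List Int)) (initialBoxes : List Int)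
    (hpre : pvPreStruct status candies keys containedBoxes initialBoxes) :
    ∀ (fuel : Nat) (P stat q locked : List Int) (tot : Int),
      pvInvA status candies keys containedBoxes initialBoxes P q locked stat tot →
      initialBoxes.length + containedBoxes.flatten.length + 1 ≤ fuel + P.length →
      ∃ O : List Int, pvALoop candies keys containedBoxes fuel stat q locked tot = pvCand candies O ∧
        O.Nodup ∧ (∀ b, b ∈ O ↔ pvReach status keys containedBoxes initialBoxes b) := by
  obtain ⟨hlc, hlk, hlct, hvi, hvk, hvc, hnd⟩ := hpre
  intro fuel
  induction fuel with
  | zero =>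
    intro P stat q locked tot hinv hfuel
    exfalso
    obtain ⟨hstat, hndP, hP, hdiscAll, hq, hlocked, hcover, htot⟩ := hinv
    have hsub : ∀ b ∈ P, b ∈ initialBoxes ++ containedBoxes.flatten := by
      intro b hb
      have hd := hdiscAll b (by simp [hb])
      rcases hd with h | h
      · exact List.mem_append.mpr (Or.inl h)
      · obtain ⟨c, hcP, hbc⟩ := List.mem_flatMap.mp h
        have hcval := (hP c hcP).1
        obtain ⟨_, hmem⟩ := pv_getD_block containedBoxes c hcval.1 (by rw [hlct]; exact hcval.2)
        exact List.mem_append.mpr (Or.inr (List.mem_flatten.mpr ⟨_, hmem, hbc⟩))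
    have hPnd : P.Nodup := (List.nodup_append.mp (List.nodup_append.mp hndP).1).1
    have hle := pv_nodup_length_le P (initialBoxes ++ containedBoxes.flatten) hPnd hsub
    rw [List.length_append] at hle
    omega
  | succ fuel ih =>
    intro P stat q locked tot hinv hfuel
    obtain ⟨hstat, hndP, hP, hdiscAll, hq, hlocked, hcover, htot⟩ := hinv
    cases hql : q.getLast? with
    | none =>
      have hqnil : q = [] := List.getLast?_eq_none_iff.mp hql
      subst hqnil
      have hPnd : P.Nodup := by
        have := (List.nodup_append.mp hndP).1
        simpa using this
      refine ⟨P, by simp [pvALoop, htot], hPnd, ?_⟩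
      intro b
      constructor
      · intro hb
        exact (hP b hb).2
      · intro hr
        induction hr with
        | init_status b hd ho =>
          rcases hcover b (Or.inl hd) with h | h | h
          · exact h
          · simp at h
          · exact absurd (Or.inl ho) (hlocked b h).2
        | init_key b c hd hc hk ihc =>
          have hop : pvOpen status keys P b := Or.inr (by
            simp only [pvKeysOf, List.mem_flatMap]; exact ⟨c, ihc, hk⟩)
          rcases hcover b (Or.inl hd) with h | h | h
          · exact h
          · simp at h
          · exact absurd hop (hlocked b h).2
        | cont_status b c hc hd ho ihc =>
          have hdisc : pvDisc containedBoxes initialBoxes P b := Or.inr (by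
            simp only [List.mem_flatMap]; exact ⟨c, ihc, hd⟩)
          rcases hcover b hdisc with h | h | h
          · exact h
          · simp at h
          · exact absurd (Or.inl ho) (hlocked b h).2
        | cont_key b c c' hc hd hc' hk ihc ihc' =>
          have hdisc : pvDisc containedBoxes initialBoxes P b := Or.inr (by
            simp only [List.mem_flatMap]; exact ⟨c, ihc, hd⟩)
          have hop : pvOpen status keys P b := Or.inr (by
            simp only [pvKeysOf, List.mem_flatMap]; exact ⟨c', ihc', hk⟩)
          rcases hcover b hdisc with h | h | h
          · exact h
          · simp at h
          · exact absurd hop (hlocked b h).2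
    | some cur =>
      rw [List.append_assoc] at hndP
      have hqeq : q.dropLast ++ [cur] = q := List.dropLast_append_getLast? cur hql
      have hcurq : cur ∈ q := by rw [← hqeq]; simp
      obtain ⟨hcv, hcr, hco⟩ := hq cur hcurq
      have hndq : q.Nodup := ((List.nodup_append.mp hndP).2.1 |> List.nodup_append.mp).1
      have hndl : locked.Nodup := ((List.nodup_append.mp hndP).2.1 |> List.nodup_append.mp).2.1
      have hdisjql : ∀ a ∈ q, a ∉ locked := by
        intro a ha hal
        exact ((List.nodup_append.mp hndP).2.1 |> List.nodup_append.mp).2.2 a ha a hal rfl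
      have hdisjPq : ∀ a ∈ P, a ∉ q ∧ a ∉ locked := by
        intro a ha
        have h := (List.nodup_append.mp hndP).2.2 a ha
        constructor
        · intro hx; exact h a (List.mem_append.mpr (Or.inl hx)) rfl
        · intro hx; exact h a (List.mem_append.mpr (Or.inr hx)) rfl
      have hcurP : cur ∉ P := fun h => (hdisjPq cur h).1 hcurq
      -- the two inner loops
      obtain ⟨hkeq, hkmem⟩ := pv_getD_block keys cur hcv.1 (by rw [hlk]; exact hcv.2)
      obtain ⟨hceq, hcmem⟩ := pv_getD_block containedBoxes cur hcv.1 (by rw [hlct]; exact hcv.2)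
      have hksv : ∀ k ∈ PySem.List.pyGetD keys cur [], 0 ≤ k ∧ k < (status.length : Int) :=
        fun k hk => hvk _ hkmem k hk
      have hcsv : ∀ b ∈ PySem.List.pyGetD containedBoxes cur [], 0 ≤ b ∧ b < (status.length : Int) :=
        fun b hb => hvc _ hcmem b hb
      have hq1sub : ∀ b ∈ q.dropLast, b ∈ q := by
        intro b hb; rw [← hqeq]; exact List.mem_append.mpr (Or.inl hb)
      obtain ⟨hs1, hs2perm, hs3, hs4, hs5⟩ :=
        pvAKey_fold status (PySem.List.pyGetD keys cur []) (pvKeysOf keys P) stat q.dropLast locked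
          hksv hstat hndl
      -- freshness of the contained boxes of cur
      have hfresh1 : ∀ b ∈ PySem.List.pyGetD containedBoxes cur [], ¬ pvDisc containedBoxes initialBoxes P b := by
        intro b hb hd
        exact pv_fresh containedBoxes initialBoxes hnd P cur b hcv.1 (by rw [hlct]; exact hcv.2) hcurP
          (fun c hc => ⟨(hP c hc).1.1, by rw [hlct]; exact (hP c hc).1.2⟩) hb hd
      have hfresh : ∀ b ∈ PySem.List.pyGetD containedBoxes cur [], b ∉ P ++ q ++ locked := by
        intro b hb hmem
        exact hfresh1 b hb (hdiscAll b hmem)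
      have hcsnd : (PySem.List.pyGetD containedBoxes cur []).Nodup := by
        have hfl : containedBoxes.flatten.Nodup := (List.nodup_append.mp hnd).2.1
        exact (List.sublist_flatten_of_mem hcmem).nodup hfl
      have hfreshl2 : ∀ b ∈ PySem.List.pyGetD containedBoxes cur [],
          b ∉ ((PySem.List.pyGetD keys cur []).foldl pvAKey (stat, q.dropLast, locked)).2.2 := by
        intro b hb hmem
        have := ((hs4 b).mp hmem).1
        exact hfresh b hb (by simp [this])
      obtain ⟨hb1, hb2⟩ :=
        pvAInit_fold (((PySem.List.pyGetD keys cur []).foldl pvAKey (stat, q.dropLast, locked)).1)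
          (PySem.List.pyGetD containedBoxes cur [])
          ((((PySem.List.pyGetD keys cur []).foldl pvAKey (stat, q.dropLast, locked))).2.1)
          ((((PySem.List.pyGetD keys cur []).foldl pvAKey (stat, q.dropLast, locked))).2.2)
          hcsnd hfreshl2
      -- notation
      set ks := PySem.List.pyGetD keys cur [] with hksdef
      set cs := PySem.List.pyGetD containedBoxes cur [] with hcsdef
      set s2 := ks.foldl pvAKey (stat, q.dropLast, locked) with hs2def
      set s3 := cs.foldl (pvAInit s2.1) (s2.2.1, s2.2.2) with hs3def
      set P' := P ++ [cur] with hP'def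
      have hkeysof : pvKeysOf keys P' = pvKeysOf keys P ++ ks := pv_keysOf_snoc keys P cur
      have hstat' : pvStatOK status (pvKeysOf keys P') s2.1 := by rw [hkeysof]; exact hs1
      have hP'r : ∀ c ∈ P', pvReach status keys containedBoxes initialBoxes c := by
        intro c hc
        rcases List.mem_append.mp hc with h | h
        · exact (hP c h).2
        · have : c = cur := by simpa using h
          exact this ▸ hcr
      have hdisc' : ∀ b, pvDisc containedBoxes initialBoxes P b → pvDisc containedBoxes initialBoxes P' b := by
        intro b hd
        rcases hd with h | h
        · exact Or.inl h
        · exact Or.inr (by rw [hP'def]; simp only [List.flatMap_append]; exact List.mem_append.mpr (Or.inl h))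
      have hdisccs : ∀ b ∈ cs, pvDisc containedBoxes initialBoxes P' b := by
        intro b hb
        refine Or.inr ?_
        rw [hP'def]
        simp only [List.flatMap_append, List.flatMap_cons, List.flatMap_nil, List.append_nil]
        exact List.mem_append.mpr (Or.inr hb)
      have hopen' : ∀ b, pvOpen status keys P b → pvOpen status keys P' b := by
        intro b ho
        rcases ho with h | h
        · exact Or.inl h
        · exact Or.inr (by rw [hkeysof]; exact List.mem_append.mpr (Or.inl h))
      have hopen_iff : ∀ b, pvValid status.length b →
          ((PySem.List.pyGetD s2.1 b 0 = 1) ↔ pvOpen status keys P' b) := by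
        intro b hbv
        constructor
        · intro h1
          by_cases hbK : b ∈ pvKeysOf keys P'
          · exact Or.inr hbK
          · exact Or.inl (by rw [← (hstat'.2 b hbv.1 hbv.2).2 hbK]; exact h1)
        · rintro (h | hbK)
          · by_cases hbK : b ∈ pvKeysOf keys P'
            · exact (hstat'.2 b hbv.1 hbv.2).1 hbK
            · rw [(hstat'.2 b hbv.1 hbv.2).2 hbK]; exact h
          · exact (hstat'.2 b hbv.1 hbv.2).1 hbK
      -- membership characterizations of the new queue and locked set
      have hq3 : ∀ b, b ∈ s3.1 ↔ (b ∈ q.dropLast ∨ (b ∈ locked ∧ b ∈ ks)) ∨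
          (b ∈ cs ∧ PySem.List.pyGetD s2.1 b 0 = 1) := by
        intro b
        rw [hs3def, hb1]
        simp only [List.mem_append, List.mem_reverse, List.mem_filter, beq_iff_eq]
        rw [hs3 b]
        tauto
      have hl3 : ∀ b, b ∈ s3.2 ↔ (b ∈ locked ∧ b ∉ ks) ∨
          (b ∈ cs ∧ ¬ PySem.List.pyGetD s2.1 b 0 = 1) := by
        intro b
        rw [hs3def, hb2]
        simp only [List.mem_append, List.mem_filter, Bool.not_eq_eq_eq_not, Bool.not_true,
          beq_eq_false_iff_ne, ne_eq, hs4 b]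
        try tauto
      -- the new big list is a permutation of the old one plus cs
      have hbig : (P' ++ s3.1 ++ s3.2).Perm ((P ++ q ++ locked) ++ cs) := by
        rw [← Multiset.coe_eq_coe]
        have e2 : ((s2.2.1 ++ s2.2.2 : List Int) : Multiset Int) = ((q.dropLast ++ locked : List Int) : Multiset Int) :=
          Multiset.coe_eq_coe.mpr hs2perm
        have e3 : ((cs.filter (fun b => PySem.List.pyGetD s2.1 b 0 == 1) ++
            cs.filter (fun b => !(PySem.List.pyGetD s2.1 b 0 == 1)) : List Int) : Multiset Int)
            = (cs : Multiset Int) :=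
          Multiset.coe_eq_coe.mpr (List.filter_append_perm _ cs)
        rw [hs3def, hb1, hb2, hP'def, ← hqeq]
        simp only [← Multiset.coe_add, Multiset.coe_reverse] at e2 e3 ⊢
        generalize hA1 : (List.filter (fun b => PySem.List.pyGetD s2.1 b 0 == 1) cs) = A1 at e3 ⊢
        generalize hA2 : (List.filter (fun b => !(PySem.List.pyGetD s2.1 b 0 == 1)) cs) = A2 at e3 ⊢
        generalize hS1 : s2.2.1 = S1 at e2 ⊢
        generalize hS2 : s2.2.2 = S2 at e2 ⊢
        have t1 : ((P : Multiset Int) + ↑[cur] + (↑A1 + ↑S1) + (↑S2 + ↑A2))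
            = (↑P + ↑[cur] + ((A1 : Multiset Int) + ↑A2) + ((S1 : Multiset Int) + ↑S2)) := by abel
        rw [t1, e2, e3]
        abel
      have hndbig : (P' ++ s3.1 ++ s3.2).Nodup := by
        rw [List.Perm.nodup_iff hbig]
        rw [List.nodup_append]
        refine ⟨by simpa [List.append_assoc] using hndP, hcsnd, ?_⟩
        intro a ha b hb hab
        exact hfresh b hb (hab ▸ ha)
      -- assemble the invariant for P'
      have hinv' : pvInvA status candies keys containedBoxes initialBoxes P' s3.1 s3.2 s2.1
          (tot + PySem.List.pyGetD candies cur 0) := by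
        have hcurP' : cur ∈ P' := by rw [hP'def]; simp
        have hmemP' : ∀ b : Int, b ∈ P → b ∈ P' := by
          intro b h; rw [hP'def]; exact List.mem_append.mpr (Or.inl h)
        refine ⟨hstat', hndbig, ?_, ?_, ?_, ?_, ?_, ?_⟩
        · intro b hb
          rcases List.mem_append.mp hb with h | h
          · exact hP b h
          · have hbc : b = cur := by simpa using h
            exact hbc ▸ ⟨hcv, hcr⟩
        · intro b hb
          rcases List.mem_append.mp hb with h | h
          · rcases List.mem_append.mp h with h' | h'
            · rcases List.mem_append.mp h' with hp | hp
              · exact hdisc' b (hdiscAll b (by simp [hp]))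
              · have hbc : b = cur := by simpa using hp
                exact hdisc' b (hbc ▸ hdiscAll cur (by simp [hcurq]))
            · rcases (hq3 b).mp h' with (h'' | h'') | h''
              · exact hdisc' b (hdiscAll b (by simp [hq1sub b h'']))
              · exact hdisc' b (hdiscAll b (by simp [h''.1]))
              · exact hdisccs b h''.1
          · rcases (hl3 b).mp h with h'' | h''
            · exact hdisc' b (hdiscAll b (by simp [h''.1]))
            · exact hdisccs b h''.1
        · intro b hb
          rcases (hq3 b).mp hb with (h | h) | h
          · obtain ⟨hv', hr', ho'⟩ := hq b (hq1sub b h)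
            exact ⟨hv', hr', hopen' b ho'⟩
          · have hv' := (hlocked b h.1).1
            have ho' : pvOpen status keys P' b :=
              Or.inr (by rw [hkeysof]; exact List.mem_append.mpr (Or.inr h.2))
            exact ⟨hv', pv_reach_of_disc_open status keys containedBoxes initialBoxes P' b hP'r
              (hdisc' b (hdiscAll b (by simp [h.1]))) ho', ho'⟩
          · have hv' : pvValid status.length b := ⟨(hcsv b h.1).1, (hcsv b h.1).2⟩
            have ho' : pvOpen status keys P' b := (hopen_iff b hv').mp h.2
            exact ⟨hv', pv_reach_of_disc_open status keys containedBoxes initialBoxes P' b hP'r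
              (hdisccs b h.1) ho', ho'⟩
        · intro b hb
          rcases (hl3 b).mp hb with h | h
          · refine ⟨(hlocked b h.1).1, ?_⟩
            intro ho'
            rcases ho' with h' | h'
            · exact (hlocked b h.1).2 (Or.inl h')
            · rw [hkeysof] at h'
              rcases List.mem_append.mp h' with h'' | h''
              · exact (hlocked b h.1).2 (Or.inr h'')
              · exact h.2 h''
          · have hv' : pvValid status.length b := ⟨(hcsv b h.1).1, (hcsv b h.1).2⟩
            exact ⟨hv', fun ho' => h.2 ((hopen_iff b hv').mpr ho')⟩
        · intro b hd
          have hstepcover : b ∈ P ∨ b ∈ q ∨ b ∈ locked → b ∈ P' ∨ b ∈ s3.1 ∨ b ∈ s3.2 := by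
            rintro (h' | h' | h')
            · exact Or.inl (hmemP' b h')
            · rw [← hqeq] at h'
              rcases List.mem_append.mp h' with h'' | h''
              · exact Or.inr (Or.inl ((hq3 b).mpr (Or.inl (Or.inl h''))))
              · have hbc : b = cur := by simpa using h''
                exact Or.inl (hbc ▸ hcurP')
            · by_cases hbk : b ∈ ks
              · exact Or.inr (Or.inl ((hq3 b).mpr (Or.inl (Or.inr ⟨h', hbk⟩))))
              · exact Or.inr (Or.inr ((hl3 b).mpr (Or.inl ⟨h', hbk⟩)))
          rcases hd with h | h
          · exact hstepcover (hcover b (Or.inl h))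
          · rw [hP'def] at h
            simp only [List.flatMap_append, List.flatMap_cons, List.flatMap_nil, List.append_nil,
              List.mem_append] at h
            rcases h with h | h
            · exact hstepcover (hcover b (Or.inr h))
            · by_cases hop : PySem.List.pyGetD s2.1 b 0 = 1
              · exact Or.inr (Or.inl ((hq3 b).mpr (Or.inr ⟨h, hop⟩)))
              · exact Or.inr (Or.inr ((hl3 b).mpr (Or.inr ⟨h, hop⟩)))
        · rw [htot, hP'def]
          simp [pvCand]
      -- take the step
      have hstep : pvALoop candies keys containedBoxes (fuel + 1) stat q locked tot
          = pvALoop candies keys containedBoxes fuel s2.1 s3.1 s3.2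
              (tot + PySem.List.pyGetD candies cur 0) := by
        conv_lhs => rw [pvALoop]
        rw [hql]
      rw [hstep]
      refine ih P' s2.1 s3.1 s3.2 (tot + PySem.List.pyGetD candies cur 0) hinv' ?_
      rw [hP'def, List.length_append, List.length_singleton]
      omega

-- one sweep pass of B (fold of pvBStep over the snapshot ss)
lemma pvBStep_fold (status candies : List Int) (keys containedBoxes : List (List Int)) (initialBoxes : List Int)
    (_hlk : keys.length = status.length) (hlct : containedBoxes.length = status.length)
    (hvi : ∀ b ∈ initialBoxes, 0 ≤ b ∧ b < (status.length : Int))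
    (hvc : ∀ l ∈ containedBoxes, ∀ b ∈ l, 0 ≤ b ∧ b < (status.length : Int)) :
    ∀ (ss : List Int) (owned keysF opened : PySem.Set Int) (tot : Int) (prog : Bool),
      pvInvB status candies keys containedBoxes initialBoxes owned keysF opened tot →
      (∀ b ∈ ss, b ∈ owned) →
      pvInvB status candies keys containedBoxes initialBoxes
        (ss.foldl (pvBStep status candies keys containedBoxes) (owned, keysF, opened, tot, prog)).1
        (ss.foldl (pvBStep status candies keys containedBoxes) (owned, keysF, opened, tot, prog)).2.1
        (ss.foldl (pvBStep status candies keys containedBoxes) (owned, keysF, opened, tot, prog)).2.2.1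
        (ss.foldl (pvBStep status candies keys containedBoxes) (owned, keysF, opened, tot, prog)).2.2.2.1 ∧
      opened.length ≤ (ss.foldl (pvBStep status candies keys containedBoxes) (owned, keysF, opened, tot, prog)).2.2.1.length ∧
      (∀ b ∈ owned, b ∈ (ss.foldl (pvBStep status candies keys containedBoxes) (owned, keysF, opened, tot, prog)).1) ∧
      (prog = false → (ss.foldl (pvBStep status candies keys containedBoxes) (owned, keysF, opened, tot, prog)).2.2.2.2 = false →
        (ss.foldl (pvBStep status candies keys containedBoxes) (owned, keysF, opened, tot, prog)) = (owned, keysF, opened, tot, false) ∧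
        ∀ b ∈ ss, b ∈ opened ∨ ¬(PySem.List.pyGetD status b 0 = 1 ∨ b ∈ keysF)) ∧
      ((ss.foldl (pvBStep status candies keys containedBoxes) (owned, keysF, opened, tot, prog)).2.2.2.2 = true →
        prog = true ∨ opened.length < (ss.foldl (pvBStep status candies keys containedBoxes) (owned, keysF, opened, tot, prog)).2.2.1.length) ∧
      (prog = true → (ss.foldl (pvBStep status candies keys containedBoxes) (owned, keysF, opened, tot, prog)).2.2.2.2 = true) := by
  intro ss
  induction ss with
  | nil =>
    intro owned keysF opened tot prog hinv _
    simp only [List.foldl_nil]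
    refine ⟨hinv, le_refl _, fun b hb => hb, fun _ hp => ⟨by rw [hp], by simp⟩, ?_, fun h => h⟩
    intro hp
    exact Or.inl hp
  | cons b ss ih =>
    intro owned keysF opened tot prog hinv hss
    obtain ⟨hnd, hop, hkf, how, htot⟩ := hinv
    have hguard : (!(PySem.Set.contains opened b) &&
        (PySem.List.pyGetD status b 0 == 1 || PySem.Set.contains keysF b)) = true ↔
        (b ∉ opened ∧ (PySem.List.pyGetD status b 0 = 1 ∨ b ∈ keysF)) := by
      simp
    simp only [List.foldl_cons]
    by_cases hg : b ∉ opened ∧ (PySem.List.pyGetD status b 0 = 1 ∨ b ∈ keysF)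
    · -- the box is opened
      have hstep : pvBStep status candies keys containedBoxes (owned, keysF, opened, tot, prog) b
          = ((PySem.List.pyGetD containedBoxes b []).foldl PySem.Set.add owned,
             PySem.Set.update keysF (PySem.List.pyGetD keys b []),
             PySem.Set.add opened b,
             tot + PySem.List.pyGetD candies b 0, true) := by
        unfold pvBStep
        rw [if_pos (hguard.mpr hg)]
      rw [hstep]
      have hbowned : b ∈ owned := hss b (by simp)
      have hbv : pvValid status.length b := by
        rcases (how b).mp hbowned with h | ⟨c, hc, hbc⟩
        · exact ⟨(hvi b h).1, (hvi b h).2⟩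
        · have hcv := (hop c hc).1
          obtain ⟨_, hmem⟩ := pv_getD_block containedBoxes c hcv.1 (by rw [hlct]; exact hcv.2)
          exact ⟨(hvc _ hmem b hbc).1, (hvc _ hmem b hbc).2⟩
      have hbr : pvReach status keys containedBoxes initialBoxes b := by
        apply pvReach_intro
        · rcases (how b).mp hbowned with h | ⟨c, hc, hbc⟩
          · exact Or.inl h
          · exact Or.inr ⟨c, (hop c hc).2, hbc⟩
        · rcases hg.2 with h | h
          · exact Or.inl h
          · obtain ⟨c, hc, hbc⟩ := (hkf b).mp h
            exact Or.inr ⟨c, (hop c hc).2, hbc⟩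
      have hadd : PySem.Set.add opened b = opened ++ [b] := PySem.Set.add_of_not_mem hg.1
      have hndop' : (PySem.Set.add opened b).Nodup := by
        rw [hadd]
        rw [List.nodup_append]
        exact ⟨hnd, by simp, by intro a ha c hc hac; simp at hc; subst hc; exact hg.1 (hac ▸ ha)⟩
      have hlen' : (PySem.Set.add opened b).length = opened.length + 1 := by
        rw [hadd, List.length_append, List.length_singleton]
      have hinv' : pvInvB status candies keys containedBoxes initialBoxes
          ((PySem.List.pyGetD containedBoxes b []).foldl PySem.Set.add owned)
          (PySem.Set.update keysF (PySem.List.pyGetD keys b []))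
          (PySem.Set.add opened b)
          (tot + PySem.List.pyGetD candies b 0) := by
        refine ⟨hndop', ?_, ?_, ?_, ?_⟩
        · intro x hx
          rw [PySem.Set.mem_add] at hx
          rcases hx with hx | hx
          · exact hop x hx
          · exact hx ▸ ⟨hbv, hbr⟩
        · intro x
          rw [PySem.Set.mem_update]
          constructor
          · rintro (hx | hx)
            · obtain ⟨c, hc, hxc⟩ := (hkf x).mp hx
              exact ⟨c, by rw [PySem.Set.mem_add]; exact Or.inl hc, hxc⟩
            · exact ⟨b, by rw [PySem.Set.mem_add]; exact Or.inr rfl, hx⟩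
          · rintro ⟨c, hc, hxc⟩
            rw [PySem.Set.mem_add] at hc
            rcases hc with hc | hc
            · exact Or.inl ((hkf x).mpr ⟨c, hc, hxc⟩)
            · exact Or.inr (hc ▸ hxc)
        · intro x
          rw [PySem.Set.mem_foldl_add (f := fun y => y)]
          constructor
          · rintro (hx | ⟨c, hc, rfl⟩)
            · rcases (how x).mp hx with h | ⟨c, hc, hxc⟩
              · exact Or.inl h
              · exact Or.inr ⟨c, by rw [PySem.Set.mem_add]; exact Or.inl hc, hxc⟩
            · exact Or.inr ⟨b, by rw [PySem.Set.mem_add]; exact Or.inr rfl, hc⟩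
          · rintro (hx | ⟨c, hc, hxc⟩)
            · exact Or.inl ((how x).mpr (Or.inl hx))
            · rw [PySem.Set.mem_add] at hc
              rcases hc with hc | hc
              · exact Or.inl ((how x).mpr (Or.inr ⟨c, hc, hxc⟩))
              · exact Or.inr ⟨x, hc ▸ hxc, rfl⟩
        · rw [htot, hadd]
          simp [pvCand]
      have hss' : ∀ x ∈ ss, x ∈ (PySem.List.pyGetD containedBoxes b []).foldl PySem.Set.add owned := by
        intro x hx
        rw [PySem.Set.mem_foldl_add (f := fun y => y)]
        exact Or.inl (hss x (by simp [hx]))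
      obtain ⟨ih1, ih2, ih3, ih4, ih5, ih6⟩ := ih _ _ _ _ true hinv' hss'
      refine ⟨ih1, ?_, ?_, ?_, ?_, fun _ => ih6 rfl⟩
      · calc opened.length ≤ (PySem.Set.add opened b).length := by omega
          _ ≤ _ := ih2
      · intro x hx
        apply ih3
        rw [PySem.Set.mem_foldl_add (f := fun y => y)]
        exact Or.inl hx
      · intro _ hfalse
        rw [ih6 rfl] at hfalse
        simp at hfalse
      · intro _
        right
        calc opened.length < (PySem.Set.add opened b).length := by omega
          _ ≤ _ := ih2
    · -- the box is skipped
      have hstep : pvBStep status candies keys containedBoxes (owned, keysF, opened, tot, prog) b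
          = (owned, keysF, opened, tot, prog) := by
        unfold pvBStep
        rw [if_neg (fun h => hg (hguard.mp h))]
      rw [hstep]
      obtain ⟨ih1, ih2, ih3, ih4, ih5, ih6⟩ :=
        ih owned keysF opened tot prog ⟨hnd, hop, hkf, how, htot⟩ (fun x hx => hss x (by simp [hx]))
      refine ⟨ih1, ih2, ih3, ?_, ih5, ih6⟩
      intro hp hfalse
      obtain ⟨he, hall⟩ := ih4 hp hfalse
      refine ⟨he, ?_⟩
      intro x hx
      rcases List.mem_cons.mp hx with rfl | hx
      · by_cases hxo : x ∈ opened
        · exact Or.inl hxo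
        · right
          intro hcon
          exact hg ⟨hxo, hcon⟩
      · exact hall x hx

lemma pvBLoop_spec (status candies : List Int) (keys containedBoxes : List (List Int)) (initialBoxes : List Int)
    (hpre : pvPreStruct status candies keys containedBoxes initialBoxes) :
    ∀ (fuel : Nat) (owned keysF opened : PySem.Set Int) (tot : Int),
      pvInvB status candies keys containedBoxes initialBoxes owned keysF opened tot →
      status.length + 1 ≤ fuel + opened.length →
      ∃ O : List Int, pvBLoop status candies keys containedBoxes fuel owned keysF opened tot = pvCand candies O ∧
        O.Nodup ∧ (∀ b, b ∈ O ↔ pvReach status keys containedBoxes initialBoxes b) := by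
  obtain ⟨hlc, hlk, hlct, hvi, hvk, hvc, hnd⟩ := hpre
  intro fuel
  induction fuel with
  | zero =>
    intro owned keysF opened tot hinv hfuel
    exfalso
    obtain ⟨hndop, hop, _, _, _⟩ := hinv
    have hsub : ∀ b ∈ opened, b ∈ PySem.List.pyRange 0 (status.length : Int) 1 := by
      intro b hb
      rw [PySem.List.mem_pyRange_one]
      exact ⟨(hop b hb).1.1, (hop b hb).1.2⟩
    have hle := pv_nodup_length_le opened (PySem.List.pyRange 0 (status.length : Int) 1) hndop hsub
    rw [PySem.List.length_pyRange_one] at hle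
    omega
  | succ fuel ih =>
    intro owned keysF opened tot hinv hfuel
    obtain ⟨h1, h2, h3, h4, h5, h6⟩ :=
      pvBStep_fold status candies keys containedBoxes initialBoxes hlk hlct hvi hvc
        owned owned keysF opened tot false hinv (fun b hb => hb)
    have hstep : pvBLoop status candies keys containedBoxes (fuel + 1) owned keysF opened tot
        = (if (owned.foldl (pvBStep status candies keys containedBoxes) (owned, keysF, opened, tot, false)).2.2.2.2 then
            pvBLoop status candies keys containedBoxes fuel
              (owned.foldl (pvBStep status candies keys containedBoxes) (owned, keysF, opened, tot, false)).1
              (owned.foldl (pvBStep status candies keys containedBoxes) (owned, keysF, opened, tot, false)).2.1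
              (owned.foldl (pvBStep status candies keys containedBoxes) (owned, keysF, opened, tot, false)).2.2.1
              (owned.foldl (pvBStep status candies keys containedBoxes) (owned, keysF, opened, tot, false)).2.2.2.1
          else (owned.foldl (pvBStep status candies keys containedBoxes) (owned, keysF, opened, tot, false)).2.2.2.1) := by
      conv_lhs => rw [pvBLoop]
    rw [hstep]
    cases hprog : (owned.foldl (pvBStep status candies keys containedBoxes) (owned, keysF, opened, tot, false)).2.2.2.2 with
    | true =>
      rw [if_pos rfl]
      rcases h5 hprog with h | h
      · simp at h
      · exact ih _ _ _ _ h1 (by omega)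
    | false =>
      rw [if_neg (by simp)]
      obtain ⟨he, hall⟩ := h4 rfl hprog
      rw [he]
      obtain ⟨hndop, hop, hkf, how, htot⟩ := hinv
      refine ⟨opened, htot, hndop, ?_⟩
      intro b
      constructor
      · intro hb
        exact (hop b hb).2
      · intro hr
        induction hr with
        | init_status b hd ho =>
          rcases hall b ((how b).mpr (Or.inl hd)) with h | h
          · exact h
          · exact absurd (Or.inl ho) h
        | init_key b c hd hc hk ihc =>
          rcases hall b ((how b).mpr (Or.inl hd)) with h | h
          · exact h
          · exact absurd (Or.inr ((hkf b).mpr ⟨c, ihc, hk⟩)) h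
        | cont_status b c hc hd ho ihc =>
          rcases hall b ((how b).mpr (Or.inr ⟨c, ihc, hd⟩)) with h | h
          · exact h
          · exact absurd (Or.inl ho) h
        | cont_key b c c' hc hd hc' hk ihc ihc' =>
          rcases hall b ((how b).mpr (Or.inr ⟨c, ihc, hd⟩)) with h | h
          · exact h
          · exact absurd (Or.inr ((hkf b).mpr ⟨c', ihc', hk⟩)) h

-- with no openable initial box, A's initial loop leaves the queue empty
lemma pvAInit_fold_noopen (status : List Int) (ib : List Int)
    (h : ∀ b ∈ ib, PySem.List.pyGetD status b 0 ≠ 1) :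
    ∀ L : PySem.Set Int, (ib.foldl (pvAInit status) ([], L)).1 = [] := by
  induction ib with
  | nil => intro L; rfl
  | cons b ib ih =>
    intro L
    have hb := h b (by simp)
    have hstep : pvAInit status (([] : List Int), L) b = ([], PySem.Set.add L b) := by
      simp [pvAInit, hb]
    simp only [List.foldl_cons, hstep]
    exact ih (fun x hx => h x (by simp [hx])) _

lemma pvALoop_nilq (candies : List Int) (keys containedBoxes : List (List Int))
    (fuel : Nat) (stat locked : List Int) (tot : Int) :
    pvALoop candies keys containedBoxes fuel stat [] locked tot = tot := by
  cases fuel <;> rfl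

lemma pvBStep_fold_noopen (status candies : List Int) (keys containedBoxes : List (List Int))
    (ss : List Int) :
    ∀ (owned : PySem.Set Int) (tot : Int),
      (∀ b ∈ ss, PySem.List.pyGetD status b 0 ≠ 1) →
      ss.foldl (pvBStep status candies keys containedBoxes) (owned, ([] : PySem.Set Int), ([] : PySem.Set Int), tot, false)
        = (owned, ([] : PySem.Set Int), ([] : PySem.Set Int), tot, false) := by
  induction ss with
  | nil => intro owned tot _; rfl
  | cons b ss ih =>
    intro owned tot h
    have hb := h b (by simp)
    have hstep : pvBStep status candies keys containedBoxes
        (owned, ([] : PySem.Set Int), ([] : PySem.Set Int), tot, false) b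
        = (owned, ([] : PySem.Set Int), ([] : PySem.Set Int), tot, false) := by
      unfold pvBStep
      rw [if_neg]
      simp [hb]
    simp only [List.foldl_cons, hstep]
    exact ih owned tot (fun x hx => h x (by simp [hx]))

lemma pvBLoop_noopen (status candies : List Int) (keys containedBoxes : List (List Int))
    (fuel : Nat) (owned : PySem.Set Int) (tot : Int)
    (h : ∀ b ∈ owned, PySem.List.pyGetD status b 0 ≠ 1) :
    pvBLoop status candies keys containedBoxes fuel owned [] [] tot = tot := by
  cases fuel with
  | zero => rfl
  | succ f =>
    have hf := pvBStep_fold_noopen status candies keys containedBoxes owned owned tot h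
    conv_lhs => rw [pvBLoop]
    rw [hf]
    rfl

-- ===== VERDICT =====
theorem maxCandies_spec : Claim_equal_maxCandies := by
  intro status candies keys containedBoxes initialBoxes _ hpre0
  unfold Spec_maxCandies
  rcases hpre0 with hno | hpre
  · -- no openable initial box: both sides return 0
    have hA0 : maxCandies status candies keys containedBoxes initialBoxes = 0 := by
      show pvALoop candies keys containedBoxes
          (initialBoxes.length + containedBoxes.flatten.length + 1) status
          (initialBoxes.foldl (pvAInit status) ([], PySem.Set.empty)).1
          (initialBoxes.foldl (pvAInit status) ([], PySem.Set.empty)).2 0 = 0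
      rw [pvAInit_fold_noopen status initialBoxes (fun b hb => (hno b hb).2) PySem.Set.empty]
      exact pvALoop_nilq _ _ _ _ _ _ _
    have hB0 : maxCandies_alt status candies keys containedBoxes initialBoxes = 0 := by
      unfold maxCandies_alt
      exact pvBLoop_noopen status candies keys containedBoxes (status.length + 1)
        (PySem.Set.ofList initialBoxes) 0
        (fun b hb => (hno b (by simpa [PySem.Set.mem_ofList] using hb)).2)
    rw [hA0, hB0]
  obtain ⟨hlc, hlk, hlct, hvi, hvk, hvc, hnd⟩ := id hpre
  -- A's initial loop
  have hndinit : initialBoxes.Nodup := (List.nodup_append.mp hnd).1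
  obtain ⟨hq0, hl0⟩ := pvAInit_fold status initialBoxes [] [] hndinit (by intro b _; simp)
  have hinvA : pvInvA status candies keys containedBoxes initialBoxes []
      (initialBoxes.foldl (pvAInit status) ([], ([] : PySem.Set Int))).1
      (initialBoxes.foldl (pvAInit status) ([], ([] : PySem.Set Int))).2 status 0 := by
    refine ⟨⟨rfl, ?_⟩, ?_, by simp, ?_, ?_, ?_, ?_, rfl⟩
    · intro b _ _
      constructor
      · intro h; simp [pvKeysOf] at h
      · intro _; rfl
    · have hperm : ((initialBoxes.foldl (pvAInit status) ([], ([] : PySem.Set Int))).1 ++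
          (initialBoxes.foldl (pvAInit status) ([], ([] : PySem.Set Int))).2).Perm initialBoxes := by
        rw [hq0, hl0]
        simp only [List.append_nil, List.nil_append]
        exact ((List.reverse_perm _).append_right _).trans (List.filter_append_perm _ _)
      simpa using (List.Perm.nodup_iff hperm).mpr hndinit
    · intro b hb
      simp only [List.nil_append, List.mem_append, hq0, hl0, List.append_nil,
        List.mem_reverse, List.mem_filter] at hb
      exact Or.inl (by tauto)
    · intro b hb
      rw [hq0] at hb
      simp only [List.append_nil, List.mem_reverse, List.mem_filter, beq_iff_eq] at hb
      exact ⟨⟨(hvi b hb.1).1, (hvi b hb.1).2⟩, pvReach.init_status b hb.1 hb.2, Or.inl hb.2⟩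
    · intro b hb
      rw [hl0] at hb
      simp only [List.nil_append, List.mem_filter, Bool.not_eq_eq_eq_not, Bool.not_true,
        beq_eq_false_iff_ne, ne_eq] at hb
      refine ⟨⟨(hvi b hb.1).1, (hvi b hb.1).2⟩, ?_⟩
      rintro (h | h)
      · exact hb.2 h
      · simp [pvKeysOf] at h
    · intro b hd
      rcases hd with h | h
      · by_cases hb1 : PySem.List.pyGetD status b 0 = 1
        · refine Or.inr (Or.inl ?_)
          rw [hq0]
          simp [List.mem_filter, h, hb1]
        · refine Or.inr (Or.inr ?_)
          rw [hl0]
          simp [List.mem_filter, h, hb1]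
      · simp at h
  obtain ⟨OA, hA, hAnd, hAiff⟩ := pvALoop_spec status candies keys containedBoxes initialBoxes hpre
    (initialBoxes.length + containedBoxes.flatten.length + 1) []
    status
    (initialBoxes.foldl (pvAInit status) ([], ([] : PySem.Set Int))).1
    (initialBoxes.foldl (pvAInit status) ([], ([] : PySem.Set Int))).2 0 hinvA (by simp)
  have hAeq : maxCandies status candies keys containedBoxes initialBoxes = pvCand candies OA := by
    unfold maxCandies
    exact hA
  -- B's initial state
  have hinvB : pvInvB status candies keys containedBoxes initialBoxes
      (PySem.Set.ofList initialBoxes) ([] : PySem.Set Int) ([] : PySem.Set Int) 0 := by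
    refine ⟨List.nodup_nil, by simp, ?_, ?_, rfl⟩
    · intro b
      simp
    · intro b
      simp [PySem.Set.mem_ofList]
  obtain ⟨OB, hB, hBnd, hBiff⟩ := pvBLoop_spec status candies keys containedBoxes initialBoxes hpre
    (status.length + 1) (PySem.Set.ofList initialBoxes) ([] : PySem.Set Int) ([] : PySem.Set Int) 0 hinvB (by simp)
  have hBeq : maxCandies_alt status candies keys containedBoxes initialBoxes = pvCand candies OB := by
    unfold maxCandies_alt
    exact hB
  have hperm : OA.Perm OB :=
    (List.perm_ext_iff_of_nodup hAnd hBnd).mpr (fun b => (hAiff b).trans ((hBiff b).symm))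
  rw [hAeq, hBeq]
  simp only [pvCand]
  exact (hperm.map _).sum_eq
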